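-- pv_equiv track=rewrite | github.com/Benedetto-Cavicchi/Personal-Project | processor.py | check_formatting
-- ===== SOURCE A (Python) =====
-- def check_formatting(text):
--     suggestions = []
--     if "  " in text:
--         suggestions.append({
--             "message": "Trovate doppie spaziature nel testo.",
--             "rule": "Controllo Formattazione"
--         })
--     if any(line.isupper() and len(line) > 10 for line in text.splitlines()):
--         suggestions.append({
--             "message": "Titoli eccessivamente in maiuscolo.",
--             "rule": "Controllo Formattazione"
--         })
--     return suggestions
-- ===== SOURCE B (Python) =====
-- def check_formatting(text):
--     # Single character-level state machine over the raw text: no substring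
--     # search and no splitlines(); a line break ('\n' or '\r') closes the
--     # running line summary (length / has_upper / has_lower), and the pair
--     # (prev, ch) detects a double space.  The spurious empty "line" a "\r\n"
--     # pair closes twice is harmless: an empty line is never > 10 chars.
--     has_double = False
--     has_caps = False
--     prev = ''
--     length = 0
--     has_upper = False
--     has_lower = False
--     for ch in text:
--         if ch == ' ' and prev == ' ':
--             has_double = True
--         if ch == '\n' or ch == '\r':
--             if length > 10 and has_upper and not has_lower:
--                 has_caps = True
--             length = 0
--             has_upper = False
--             has_lower = False
--         else:
--             length += 1
--             if ch.isupper():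
--                 has_upper = True
--             if ch.islower():
--                 has_lower = True
--         prev = ch
--     if length > 10 and has_upper and not has_lower:
--         has_caps = True
--     suggestions = []
--     if has_double:
--         suggestions.append({
--             "message": "Trovate doppie spaziature nel testo.",
--             "rule": "Controllo Formattazione"
--         })
--     if has_caps:
--         suggestions.append({
--             "message": "Titoli eccessivamente in maiuscolo.",
--             "rule": "Controllo Formattazione"
--         })
--     return suggestions
-- ===== Notes on version B (the rewrite author's own statement) =====
-- stated objective: alternative
-- what changed: A's two independent whole-text scans (a substring search for ' ' and a generator over splitlines() calling isupper/len per line) are replaced by one character-level state machine that reads the raw text once, detecting a double space from the (prev, ch) pair and closing a running line summary (length, has_upper, has_lower) at each '\n'/'\r'; no substring search and no splitlines at all.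
import Mathlib
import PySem

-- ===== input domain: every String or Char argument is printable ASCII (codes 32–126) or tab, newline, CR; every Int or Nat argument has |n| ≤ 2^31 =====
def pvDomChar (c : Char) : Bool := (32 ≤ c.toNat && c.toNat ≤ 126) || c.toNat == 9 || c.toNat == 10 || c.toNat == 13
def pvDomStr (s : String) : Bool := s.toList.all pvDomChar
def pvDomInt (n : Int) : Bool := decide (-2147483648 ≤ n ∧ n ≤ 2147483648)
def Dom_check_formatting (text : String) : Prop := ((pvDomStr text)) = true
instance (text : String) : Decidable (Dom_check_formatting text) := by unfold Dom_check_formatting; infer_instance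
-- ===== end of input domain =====

-- B replaces A's two independent whole-text scans (substring search, splitlines + per-line
-- isupper/len) by ONE character-level state machine over the raw text; same return value,
-- objective: alternative algorithm (same asymptotic cost).

-- Python str.isupper(): at least one cased character and no lowercase one — exact on the ASCII
-- domain, where the cased characters are exactly the letters (PySem has only char-level predicates).
def pyIsupper (cs : List Char) : Bool :=
  cs.any PySem.Chars.isupper && !cs.any PySem.Chars.islower

def msgDouble : List (String × String) :=
  [("message", "Trovate doppie spaziature nel testo."), ("rule", "Controllo Formattazione")]
def msgCaps : List (String × String) :=
  [("message", "Titoli eccessivamente in maiuscolo."), ("rule", "Controllo Formattazione")]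

-- ===== PORT A =====
def check_formatting (text : String) : List (List (String × String)) :=
  let suggestions : List (List (String × String)) := []
  let suggestions :=
    if PySem.Str.isIn "  " text then suggestions ++ [msgDouble] else suggestions
  let suggestions :=
    if (PySem.Str.splitlines text).any
        (fun line => pyIsupper line.toList && decide (10 < PySem.Str.len line)) then
      suggestions ++ [msgCaps]
    else suggestions
  suggestions

-- ===== PORT B =====
-- "if length > 10 and has_upper and not has_lower" — the line-closing test of Source B
def closeCaps (len : Int) (up low : Bool) : Bool := decide (10 < len) && up && !low

-- the (has_double, prev) half of the loop state and its update
def bStep1 (st : Bool × Option Char) (ch : Char) : Bool × Option Char :=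
  (st.1 || (ch == ' ' && st.2 == some ' '), some ch)

-- the (has_caps, length, has_upper, has_lower) half of the loop state and its update
def bStep2 (st : Bool × Int × Bool × Bool) (ch : Char) : Bool × Int × Bool × Bool :=
  if ch == '\n' || ch == '\r' then
    (st.1 || closeCaps st.2.1 st.2.2.1 st.2.2.2, 0, false, false)
  else
    (st.1, st.2.1 + 1,
     st.2.2.1 || PySem.Chars.isupper ch, st.2.2.2 || PySem.Chars.islower ch)

def check_formatting_alt (text : String) : List (List (String × String)) :=
  let r := text.toList.foldl
    (fun (st : (Bool × Option Char) × (Bool × Int × Bool × Bool)) ch =>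
      (bStep1 st.1 ch, bStep2 st.2 ch))
    ((false, none), (false, 0, false, false))
  let has_double := r.1.1
  let has_caps := r.2.1 || closeCaps r.2.2.1 r.2.2.2.1 r.2.2.2.2
  let suggestions : List (List (String × String)) := []
  let suggestions := if has_double then suggestions ++ [msgDouble] else suggestions
  let suggestions := if has_caps then suggestions ++ [msgCaps] else suggestions
  suggestions

-- ===== PRECONDITION & SPEC =====
def Spec_check_formatting (text : String) (out : List (List (String × String))) : Prop := out = check_formatting_alt text
instance (text : String) (out : List (List (String × String))) : Decidable (Spec_check_formatting text out) := by unfold Spec_check_formatting; infer_instance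

-- ===== CLAIM (what is proved, stated in full; the proofs are below) =====
def Claim_equal_check_formatting : Prop := ∀ (text : String), Dom_check_formatting text → Spec_check_formatting text (check_formatting text)

-- ===== LEMMAS AND PROOFS =====

-- "contains a double space", in the one-step recursive form the induction needs
def hasDD : List Char → Bool
  | [] => false
  | [_] => false
  | a :: b :: r => (a == ' ' && b == ' ') || hasDD (b :: r)

theorem hasDD_iff_infix : ∀ l : List Char, hasDD l = true ↔ [' ', ' '] <:+: l := by
  intro l
  induction l with
  | nil => simp [hasDD]
  | cons c l ih =>
    cases l with
    | nil => simp [hasDD, List.infix_cons_iff, List.cons_prefix_cons]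
    | cons b r =>
      simp only [hasDD, List.infix_cons_iff, Bool.or_eq_true, Bool.and_eq_true, beq_iff_eq] at *
      rw [ih]
      simp [List.cons_prefix_cons]
      tauto

theorem isIn_eq_hasDD (l : List Char) : PySem.Chars.isIn [' ', ' '] l = hasDD l := by
  by_cases h : hasDD l = true
  · rw [h, PySem.Chars.isIn_iff_infix]
    exact (hasDD_iff_infix l).1 h
  · rw [Bool.not_eq_true] at h
    rw [h, PySem.Chars.isIn_eq_false_iff]
    intro hinf
    rw [(hasDD_iff_infix l).2 hinf] at h
    simp at h

-- double-space detection from a pending previous character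
def ddp : Option Char → List Char → Bool
  | _, [] => false
  | p, c :: r => (c == ' ' && p == some ' ') || ddp (some c) r

theorem foldl_bStep1 (l : List Char) : ∀ (d : Bool) (p : Option Char),
    (l.foldl bStep1 (d, p)).1 = (d || ddp p l) := by
  induction l with
  | nil => intro d p; simp [ddp]
  | cons c r ih =>
    intro d p
    simp only [List.foldl_cons, bStep1, ddp, ih, Bool.or_assoc]

theorem ddp_some (l : List Char) : ∀ a, ddp (some a) l = hasDD (a :: l) := by
  induction l with
  | nil => intro a; simp [ddp, hasDD]
  | cons b r ih =>
    intro a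
    simp only [ddp, ih, hasDD]
    cases ha : (a == ' ') <;> cases hb : (b == ' ') <;> simp [ha]

theorem ddp_none (l : List Char) : ddp none l = hasDD l := by
  cases l with
  | nil => rfl
  | cons c r => simp [ddp, ddp_some]

-- what A tests per splitlines-line, on the char-list side
def capsOf (cl : List Char) : Bool := pyIsupper cl && decide (10 < (cl.length : Int))

theorem capsOf_eq (cl : List Char) :
    capsOf cl = closeCaps (cl.length : Int) (cl.any PySem.Chars.isupper) (cl.any PySem.Chars.islower) := by
  simp only [capsOf, pyIsupper, closeCaps]
  cases cl.any PySem.Chars.isupper <;> cases cl.any PySem.Chars.islower <;>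
    cases h : decide (10 < (cl.length : Int)) <;> simp

-- B's caps flag after consuming s, starting from a given line summary
def capsFold (s : List Char) (st : Bool × Int × Bool × Bool) : Bool :=
  let r := s.foldl bStep2 st
  r.1 || closeCaps r.2.1 r.2.2.1 r.2.2.2

-- the caps flag distributes as an 'or' over the fold; the summary ignores the flag
theorem foldl_bStep2_flag (s : List Char) : ∀ (b : Bool) (t : Int × Bool × Bool),
    s.foldl bStep2 (b, t)
      = (b || (s.foldl bStep2 (false, t)).1, (s.foldl bStep2 (false, t)).2) := by
  induction s with
  | nil => intro b t; simp
  | cons c r ih =>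
    intro b t
    by_cases h : (c == '\n' || c == '\r') = true
    · simp only [List.foldl_cons, bStep2, h, if_pos, Bool.false_or]
      rw [ih (b || closeCaps t.1 t.2.1 t.2.2), ih (closeCaps t.1 t.2.1 t.2.2)]
      simp [Bool.or_assoc]
    · simp only [List.foldl_cons, bStep2, if_neg h]
      rw [ih b, ih false]

-- Char equality through toNat (used to compare splitlines' code-point tests with B's char tests)
theorem charToNat_inj (c d : Char) : c.toNat = d.toNat ↔ c = d := eq_iff_eq_of_cmp_eq_cmp rfl

-- on the domain, the only line-break characters are '\n' and '\r'
theorem isB_dom (isB : Char → Bool)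
    (hisB : ∀ c : Char,
      isB c = (decide (c.toNat = 10) || decide (c.toNat = 13) || decide (c.toNat = 11) ||
        decide (c.toNat = 12) || decide (c.toNat = 28) || decide (c.toNat = 29) ||
        decide (c.toNat = 30) || decide (c.toNat = 133) || decide (c.toNat = 8232) ||
        decide (c.toNat = 8233)))
    (c : Char) (h : pvDomChar c = true) : isB c = (c == '\n' || c == '\r') := by
  have h10 : (c == '\n') = decide (c.toNat = 10) := by
    rw [Bool.eq_iff_iff]
    simp only [beq_iff_eq, decide_eq_true_eq]
    rw [show (10 : Nat) = ('\n').toNat from rfl, charToNat_inj]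
  have h13 : (c == '\r') = decide (c.toNat = 13) := by
    rw [Bool.eq_iff_iff]
    simp only [beq_iff_eq, decide_eq_true_eq]
    rw [show (13 : Nat) = ('\r').toNat from rfl, charToNat_inj]
  rw [hisB c, h10, h13]
  simp only [pvDomChar, Bool.or_eq_true, Bool.and_eq_true, decide_eq_true_eq,
    beq_iff_eq] at h
  have hno : ¬ (c.toNat = 11 ∨ c.toNat = 12 ∨ c.toNat = 28 ∨ c.toNat = 29 ∨ c.toNat = 30 ∨
      c.toNat = 133 ∨ c.toNat = 8232 ∨ c.toNat = 8233) := by omega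
  push Not at hno
  obtain ⟨h11, h12, h28, h29, h30, h133, h8232, h8233⟩ := hno
  simp [h11, h12, h28, h29, h30, h133, h8232, h8233]

-- the test is insensitive to reversing the line, and an empty line never fires
theorem capsOf_reverse (cl : List Char) : capsOf cl.reverse = capsOf cl := by
  simp [capsOf, pyIsupper]

theorem closeCaps_zero : closeCaps 0 false false = false := by simp [closeCaps]

-- some produced line passes A's caps test iff B's char-level machine raises the flag
theorem go_caps (isB : Char → Bool)
    (hch : ∀ c : Char, pvDomChar c = true → isB c = (c == '\n' || c == '\r')) :
    ∀ (s cur : List Char) (acc : List (List Char)), (∀ c ∈ s, pvDomChar c = true) →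
      (PySem.Chars.splitlines.go isB s cur acc).any capsOf
        = (acc.any capsOf ||
            capsFold s (false, (cur.length : Int), cur.any PySem.Chars.isupper,
              cur.any PySem.Chars.islower)) := by
  intro s cur acc
  fun_induction PySem.Chars.splitlines.go isB s cur acc with
  | case1 cur acc h =>
    intro _
    rw [List.isEmpty_iff] at h
    subst h
    simp [capsFold, closeCaps, List.any_reverse]
  | case2 cur acc h =>
    intro _
    simp only [capsFold, List.foldl_nil, List.any_reverse, List.any_cons]
    rw [← capsOf_eq, capsOf_reverse]
    simp [Bool.or_comm]
  | case3 rest cur acc ih =>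
    intro hdom
    rw [ih (fun c hc => hdom c (by simp [hc]))]
    simp only [capsFold, List.foldl_cons, bStep2,
      show (('\x0d' == '\n' || '\x0d' == '\r')) = true from rfl,
      show (('\n' == '\n' || '\n' == '\r')) = true from rfl, if_pos, Bool.false_or]
    rw [foldl_bStep2_flag rest (closeCaps (cur.length : Int) (cur.any PySem.Chars.isupper)
        (cur.any PySem.Chars.islower) || closeCaps 0 false false) (0, false, false)]
    simp only [List.any_cons, closeCaps_zero, Bool.or_false]
    rw [← capsOf_eq, capsOf_reverse]
    simp only [List.length_nil, Nat.cast_zero, List.any_nil]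
    simp [Bool.or_assoc, Bool.or_comm, Bool.or_left_comm]
  | case4 c rest cur acc hne hb ih =>
    intro hdom
    have hbr : (c == '\n' || c == '\r') = true := by
      rw [← hch c (hdom c (by simp))]; exact hb
    rw [ih (fun x hx => hdom x (by simp [hx]))]
    simp only [capsFold, List.foldl_cons, bStep2, hbr, if_pos, Bool.false_or]
    rw [foldl_bStep2_flag rest (closeCaps (cur.length : Int) (cur.any PySem.Chars.isupper)
        (cur.any PySem.Chars.islower)) (0, false, false)]
    simp only [List.any_cons]
    rw [← capsOf_eq, capsOf_reverse]
    simp only [List.length_nil, Nat.cast_zero, List.any_nil]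
    simp [Bool.or_assoc, Bool.or_comm, Bool.or_left_comm]
  | case5 c rest cur acc hne hb ih =>
    intro hdom
    have hbr : (c == '\n' || c == '\r') = false := by
      rw [← hch c (hdom c (by simp))]; exact Bool.eq_false_iff.mpr hb
    have hst : ((false, ((c :: cur).length : Int), (c :: cur).any PySem.Chars.isupper,
          (c :: cur).any PySem.Chars.islower) : Bool × Int × Bool × Bool)
        = (false, (cur.length : Int) + 1,
            cur.any PySem.Chars.isupper || PySem.Chars.isupper c,
            cur.any PySem.Chars.islower || PySem.Chars.islower c) := by
      simp only [List.length_cons, List.any_cons, Prod.mk.injEq]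
      refine ⟨trivial, by push_cast; ring, Bool.or_comm _ _, Bool.or_comm _ _⟩
    rw [ih (fun x hx => hdom x (by simp [hx])), hst]
    simp only [capsFold, List.foldl_cons, bStep2, hbr, Bool.false_eq_true, if_false]

-- ===== VERDICT (by name: the statement is the Claim_ definition above) =====
theorem check_formatting_spec : Claim_equal_check_formatting := by
  intro text hdom
  unfold Spec_check_formatting check_formatting check_formatting_alt
  rw [PySem.List.foldl_prod_mk (f := bStep1) (g := bStep2)]
  have hdd : (text.toList.foldl bStep1 (false, none)).1 = PySem.Str.isIn "  " text := by
    rw [foldl_bStep1, ddp_none, PySem.Str.isIn_eq,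
      show ("  ".toList) = [' ', ' '] from by decide, isIn_eq_hasDD]
    simp
  have hcaps :
      (PySem.Str.splitlines text).any
          (fun line => pyIsupper line.toList && decide (10 < PySem.Str.len line))
        = capsFold text.toList (false, 0, false, false) := by
    simp only [PySem.Str.splitlines, List.any_map, Function.comp_def, String.toList_ofList,
      PySem.Str.len_eq]
    rw [show (fun cl : List Char => pyIsupper cl && decide (10 < (cl.length : Int))) = capsOf
        from rfl]
    rw [PySem.Chars.splitlines]
    have hdom' : ∀ c ∈ text.toList, pvDomChar c = true := by
      unfold Dom_check_formatting pvDomStr at hdom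
      exact List.all_eq_true.mp hdom
    rw [go_caps _ (isB_dom _ (fun c => rfl)) _ _ _ hdom']
    simp
  simp only [hdd, capsFold] at *
  rw [hcaps]
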